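-- pv_equiv track=rewrite | github.com/wangzhen970/poetry-generation | poetry_scorer/shi/shi_rhythm.py | _which_sentence
-- ===== SOURCE A (Python) =====
-- def _which_sentence(first_sen_type: int, how_many: int, first_yayun: int, poem_pingze: int) -> list[int]:
--     """
--         根据首句推测后续句的格式。
--         Args:
--             first_sen_type: 首句的句式格式代码
--             how_many: 诗的句数
--             first_yayun: 首句是否押韵，-1押仄韵 1押平韵 0不押韵
--             poem_pingze: 诗歌的平仄代码
--         Returns:
--             每个句子对应的规则代码的列表
--         """
--     sen_list = []
--     turn_rule = {1: 2, 2: 3, 3: 4, 4: 1, 5: 6, 6: 7, 7: 8, 8: 5}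
--     first_rule = {1: 3, 2: 4, 3: 1, 4: 2, 5: 7, 6: 8, 7: 5, 8: 6}
--     ze_turn_rule = {2: 1, 3: 2, 4: 3, 1: 4, 6: 5, 7: 6, 8: 7, 5: 8}
--     ze_first_rule = {3: 1, 4: 2, 1: 3, 2: 4, 7: 5, 8: 6, 5: 7, 6: 8}
--     for _ in range(how_many):
--         sen_list.append(first_sen_type)
--         if first_yayun and _ == 0:  # 若首句押韵
--             if poem_pingze == 1:
--                 first_sen_type = first_rule[first_sen_type]
--             else:
--                 first_sen_type = ze_first_rule[first_sen_type]
--         else: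
--             if poem_pingze == 1:
--                 first_sen_type = turn_rule[first_sen_type]
--             else:
--                 first_sen_type = ze_turn_rule[first_sen_type]
--     return sen_list
-- ===== SOURCE B (Python) =====
-- def _which_sentence(first_sen_type: int, how_many: int, first_yayun: int, poem_pingze: int) -> list[int]:
--     # Closed-form: result[0] is first_sen_type; later entries walk the 4-cycle of the
--     # block {1..4} or {5..8}, direction given by poem_pingze, with a +2 jump after an
--     # opening rhymed line (both first-rule dicts are the same +2 map).
--     if how_many <= 0:
--         return []
--     base = 1 if first_sen_type <= 4 else 5
--     step = 1 if poem_pingze == 1 else -1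
--     second = (first_sen_type - base + (2 if first_yayun else step)) % 4
--     return [first_sen_type] + [base + (second + step * i) % 4 for i in range(how_many - 1)]
-- ===== Notes on version B (the rewrite author's own statement) =====
-- stated objective: simpler
-- what changed: Replaces the per-iteration dict-lookup loop with a closed form: the tail is an arithmetic walk on the 4-cycle of the sentence's block ({1-4} or {5-8}), direction from poem_pingze, with a +2 offset after a rhymed opening line (both first-rule dicts are the same +2 map), built by a single comprehension.
import Mathlib
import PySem

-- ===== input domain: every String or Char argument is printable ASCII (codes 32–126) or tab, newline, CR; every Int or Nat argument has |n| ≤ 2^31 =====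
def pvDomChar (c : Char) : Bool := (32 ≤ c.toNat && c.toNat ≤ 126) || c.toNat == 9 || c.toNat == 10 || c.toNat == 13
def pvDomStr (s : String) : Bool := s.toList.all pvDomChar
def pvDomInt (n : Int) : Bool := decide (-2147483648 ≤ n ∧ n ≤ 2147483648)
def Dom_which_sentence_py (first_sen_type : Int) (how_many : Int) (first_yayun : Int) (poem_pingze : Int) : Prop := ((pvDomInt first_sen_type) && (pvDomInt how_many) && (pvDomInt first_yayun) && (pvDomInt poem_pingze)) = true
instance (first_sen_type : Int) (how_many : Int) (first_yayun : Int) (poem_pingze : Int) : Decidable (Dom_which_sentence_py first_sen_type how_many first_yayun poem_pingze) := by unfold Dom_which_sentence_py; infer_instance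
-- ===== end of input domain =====

-- B replaces A's dict-lookup loop by a closed-form arithmetic walk on the block's 4-cycle (objective: simpler).

-- ===== PORT A =====
def pvTurnRule : PySem.Dict Int Int := PySem.Dict.ofList [(1,2),(2,3),(3,4),(4,1),(5,6),(6,7),(7,8),(8,5)]
def pvFirstRule : PySem.Dict Int Int := PySem.Dict.ofList [(1,3),(2,4),(3,1),(4,2),(5,7),(6,8),(7,5),(8,6)]
def pvZeTurnRule : PySem.Dict Int Int := PySem.Dict.ofList [(2,1),(3,2),(4,3),(1,4),(6,5),(7,6),(8,7),(5,8)]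
def pvZeFirstRule : PySem.Dict Int Int := PySem.Dict.ofList [(3,1),(4,2),(1,3),(2,4),(7,5),(8,6),(5,7),(6,8)]

-- dict[key] raises KeyError on a missing key; Pre_ excludes those inputs, so the port reads .getD 0 there.
def pvStepA (first_yayun poem_pingze i cur : Int) : Int :=
  if first_yayun ≠ 0 ∧ i = 0 then
    if poem_pingze = 1 then (pvFirstRule.get? cur).getD 0 else (pvZeFirstRule.get? cur).getD 0
  else
    if poem_pingze = 1 then (pvTurnRule.get? cur).getD 0 else (pvZeTurnRule.get? cur).getD 0

def which_sentence_py (first_sen_type : Int) (how_many : Int) (first_yayun : Int) (poem_pingze : Int) : List Int :=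
  ((PySem.List.pyRange 0 how_many 1).foldl
    (fun (st : List Int × Int) i => (st.1 ++ [st.2], pvStepA first_yayun poem_pingze i st.2))
    ([], first_sen_type)).1

-- ===== PORT B =====
def which_sentence_py_alt (first_sen_type : Int) (how_many : Int) (first_yayun : Int) (poem_pingze : Int) : List Int :=
  if how_many ≤ 0 then []
  else
    let base : Int := if first_sen_type ≤ 4 then 1 else 5
    let step : Int := if poem_pingze = 1 then 1 else -1
    let second : Int := PySem.Int.mod (first_sen_type - base + (if first_yayun ≠ 0 then 2 else step)) 4
    first_sen_type ::
      (PySem.List.pyRange 0 (how_many - 1) 1).map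
        (fun i => base + PySem.Int.mod (second + step * i) 4)

-- ===== PRECONDITION & SPEC =====
-- Pre_ excludes exactly the inputs where A raises KeyError: how_many ≥ 1 with a sentence type outside 1..8.
def Pre_which_sentence_py (first_sen_type : Int) (how_many : Int) (first_yayun : Int) (poem_pingze : Int) : Prop :=
  how_many ≤ 0 ∨ (1 ≤ first_sen_type ∧ first_sen_type ≤ 8)
instance (first_sen_type : Int) (how_many : Int) (first_yayun : Int) (poem_pingze : Int) : Decidable (Pre_which_sentence_py first_sen_type how_many first_yayun poem_pingze) := by unfold Pre_which_sentence_py; infer_instance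

def pvWitness_which_sentence_py : Int × Int × Int × Int := (1, 4, 1, 1)

def Spec_which_sentence_py (first_sen_type : Int) (how_many : Int) (first_yayun : Int) (poem_pingze : Int) (out : List Int) : Prop := out = which_sentence_py_alt first_sen_type how_many first_yayun poem_pingze
instance (first_sen_type : Int) (how_many : Int) (first_yayun : Int) (poem_pingze : Int) (out : List Int) : Decidable (Spec_which_sentence_py first_sen_type how_many first_yayun poem_pingze out) := by unfold Spec_which_sentence_py; infer_instance

-- ===== CLAIM (what is proved, stated in full; the proofs are below) =====
def Claim_equal_which_sentence_py : Prop := ∀ (first_sen_type : Int) (how_many : Int) (first_yayun : Int) (poem_pingze : Int), Dom_which_sentence_py first_sen_type how_many first_yayun poem_pingze → Pre_which_sentence_py first_sen_type how_many first_yayun poem_pingze → Spec_which_sentence_py first_sen_type how_many first_yayun poem_pingze (which_sentence_py first_sen_type how_many first_yayun poem_pingze)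

-- ===== LEMMAS AND PROOFS =====

-- block base (1 or 5) and offset within the block
def pvBase (s : Int) : Int := if s ≤ 4 then 1 else 5

-- In-block shape of one turn step: for s in 1..8, the looked-up value is
-- base + (offset + step) mod 4, stays in 1..8 and keeps its block.
theorem pvStepA_turn (fy pz i s : Int) (hi : ¬ (fy ≠ 0 ∧ i = 0)) (hs : 1 ≤ s ∧ s ≤ 8) :
    pvStepA fy pz i s
      = pvBase s + PySem.Int.mod (s - pvBase s + (if pz = 1 then 1 else -1)) 4
    ∧ 1 ≤ pvStepA fy pz i s ∧ pvStepA fy pz i s ≤ 8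
    ∧ pvBase (pvStepA fy pz i s) = pvBase s := by
  simp only [pvStepA, if_neg hi]
  obtain ⟨h1, h8⟩ := hs
  by_cases hp : pz = 1 <;> simp only [hp] <;> interval_cases s <;> simp <;> decide

-- First step (index 0): both first-rule dicts are the +2 map, the turn dicts the ±1 map.
theorem pvStepA_first (fy pz s : Int) (hs : 1 ≤ s ∧ s ≤ 8) :
    pvStepA fy pz 0 s
      = pvBase s + PySem.Int.mod (s - pvBase s + (if fy ≠ 0 then 2 else (if pz = 1 then 1 else -1))) 4
    ∧ 1 ≤ pvStepA fy pz 0 s ∧ pvStepA fy pz 0 s ≤ 8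
    ∧ pvBase (pvStepA fy pz 0 s) = pvBase s := by
  obtain ⟨h1, h8⟩ := hs
  simp only [pvStepA]
  by_cases hy : fy ≠ 0 <;> by_cases hp : pz = 1 <;>
    simp only [hy, hp] <;> interval_cases s <;> simp [hy] <;> decide

-- The tail loop (all indices ≠ 0) from a state s in 1..8 appends the arithmetic walk.
theorem pvFoldA (fy pz : Int) (l : List Int) (hl : ∀ x ∈ l, x ≠ 0) (acc : List Int)
    (s : Int) (hs : 1 ≤ s ∧ s ≤ 8) :
    (l.foldl (fun (st : List Int × Int) i => (st.1 ++ [st.2], pvStepA fy pz i st.2)) (acc, s)).1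
      = acc ++ (List.range l.length).map
          (fun k : Nat => pvBase s + PySem.Int.mod (s - pvBase s + (if pz = 1 then 1 else -1) * (k : Int)) 4) := by
  induction l generalizing acc s with
  | nil => simp
  | cons i l ih =>
    have hi : ¬ (fy ≠ 0 ∧ i = 0) := by
      intro h; exact hl i (List.mem_cons_self) h.2
    obtain ⟨heq, hlo, hhi, hbase⟩ := pvStepA_turn fy pz i s hi hs
    simp only [List.foldl_cons]
    rw [ih (fun x hx => hl x (List.mem_cons_of_mem _ hx)) _ _ ⟨hlo, hhi⟩]
    rw [List.length_cons, List.range_succ_eq_map, List.map_cons, List.map_map, List.append_assoc]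
    congr 1
    have h04 : (0:Int) < 4 := by norm_num
    have hmod : ∀ a : Int, PySem.Int.mod a 4 = a % 4 := fun a => PySem.Int.mod_eq_emod_of_pos h04
    have hoff : 0 ≤ s - pvBase s ∧ s - pvBase s < 4 := by
      unfold pvBase; split <;> omega
    rw [List.singleton_append]
    congr 1
    · -- head element equals s
      simp only [Nat.cast_zero, Int.mul_zero, Int.add_zero, hmod]
      omega
    · -- tail: shift the walk by one step
      apply List.map_congr_left
      intro k _
      rw [heq] at hbase
      simp only [Function.comp, heq, hbase]
      simp only [hmod]
      by_cases hp : pz = 1 <;> simp only [hp, if_true, if_false] <;> push_cast <;> omega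

-- Agreement on the non-trivial case how_many ≥ 1, first_sen_type ∈ 1..8.
theorem pv_main (fst hm fy pz : Int) (hhm : 0 < hm) (hs : 1 ≤ fst ∧ fst ≤ 8) :
    which_sentence_py fst hm fy pz = which_sentence_py_alt fst hm fy pz := by
  unfold which_sentence_py which_sentence_py_alt
  rw [if_neg (by omega)]
  rw [PySem.List.pyRange_one_cons (by omega)]
  simp only [List.foldl_cons]
  obtain ⟨heq, hlo, hhi, hbase⟩ := pvStepA_first fy pz fst hs
  rw [pvFoldA fy pz _ (fun x hx => by
        have := (PySem.List.mem_pyRange_one).1 hx; omega) _ _ ⟨hlo, hhi⟩]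
  rw [PySem.List.pyRange_one 0 (hm - 1), List.map_map]
  rw [PySem.List.length_pyRange_one]
  have hn : (hm - (0 + 1)).toNat = (hm - 1 - 0).toNat := by omega
  rw [hn, List.nil_append, List.singleton_append]
  congr 1
  apply List.map_congr_left
  intro k _
  rw [heq] at hbase
  simp only [Function.comp, heq, hbase]
  simp only [pvBase]
  congr 2
  ring

-- ===== VERDICT (by name: the statement is the Claim_ definition above) =====
theorem which_sentence_py_spec : Claim_equal_which_sentence_py := by
  intro fst hm fy pz _ hpre
  unfold Spec_which_sentence_py
  by_cases hhm : hm ≤ 0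
  · have h0 : PySem.List.pyRange 0 hm 1 = [] := by
      rw [PySem.List.pyRange_one]
      have hz : (hm - 0).toNat = 0 := by omega
      rw [hz]; rfl
    simp [which_sentence_py, which_sentence_py_alt, h0, hhm]
  · have hs : 1 ≤ fst ∧ fst ≤ 8 := by
      rcases hpre with h | h
      · omega
      · exact h
    exact pv_main fst hm fy pz (by omega) hs
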